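-- pv_equiv track=rewrite | github.com/alekkswithak/arkera | q2.py | largest_loss
-- ===== SOURCE A (Python) =====
-- def largest_loss(pricesList):
--     if len(pricesList) <= 1:
--         return 0
--
--     max_value = max(pricesList)
--     last_max_index = max(i for i, v in enumerate(pricesList) if v == max_value)
--     if last_max_index == 0:
--         return 0
--
--     min_value = min(pricesList[:last_max_index])
--     return max_value - min_value
-- ===== SOURCE B (Python) =====
-- def largest_loss(pricesList):
--     result = 0
--     run_min = None
--     cur_max = None
--     for i, v in enumerate(pricesList):
--         if cur_max is None or v >= cur_max:
--             cur_max = v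
--             if i > 0:
--                 result = v - run_min
--         if run_min is None or v < run_min:
--             run_min = v
--     return result
-- ===== Notes on version B (the rewrite author's own statement) =====
-- stated objective: alternative
-- what changed: Replaced A's four separate passes (max, enumerate-filter for the last max index, slice copy, min of the slice) with a single left-to-right pass keeping a running minimum and running maximum, updating the answer whenever the running maximum is met or beaten at a positive index (so later ties overwrite, reproducing the last-max-index tie-break).
import Mathlib
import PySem

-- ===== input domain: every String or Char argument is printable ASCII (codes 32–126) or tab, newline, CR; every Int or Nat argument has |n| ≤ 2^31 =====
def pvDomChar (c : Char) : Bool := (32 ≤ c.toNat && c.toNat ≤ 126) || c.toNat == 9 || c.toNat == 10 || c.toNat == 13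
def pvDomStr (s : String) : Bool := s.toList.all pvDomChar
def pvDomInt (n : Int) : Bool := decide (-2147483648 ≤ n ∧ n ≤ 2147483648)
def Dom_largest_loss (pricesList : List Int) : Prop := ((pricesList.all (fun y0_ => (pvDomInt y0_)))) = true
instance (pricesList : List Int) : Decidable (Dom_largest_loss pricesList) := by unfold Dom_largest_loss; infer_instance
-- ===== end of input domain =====

-- B replaces A's four passes (max, last-max-index scan, slice copy, min) by one running-min/running-max pass over the list.

-- ===== PORT A =====
def largest_loss (pricesList : List Int) : Int :=
  if pricesList.length ≤ 1 then 0
  else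
    match PySem.List.max? pricesList (fun y => y) with
    | none => 0  -- unreachable: the list is nonempty here
    | some maxValue =>
      match PySem.List.max?
          (((PySem.List.enumerate pricesList 0).filter (fun p => p.2 == maxValue)).map (·.1))
          (fun y => y) with
      | none => 0  -- unreachable: maxValue occurs in the list
      | some lastMaxIndex =>
        if lastMaxIndex == 0 then 0
        else
          match PySem.List.min? (PySem.List.slice pricesList none (some lastMaxIndex)) (fun y => y) with
          | none => 0  -- unreachable: the slice is nonempty here
          | some minValue => maxValue - minValue

-- ===== PORT B =====
-- one loop step of Source B; state = (result, run_min, cur_max)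
def llStep (st : Int × Option Int × Option Int) (p : Int × Int) : Int × Option Int × Option Int :=
  let result := st.1
  let runMin := st.2.1
  let curMax := st.2.2
  let i := p.1
  let v := p.2
  let trig : Bool := match curMax with | none => true | some m => decide (m ≤ v)
  let curMax' := if trig then some v else curMax
  let result' :=
    if trig && decide (0 < i) then
      match runMin with
      | some r => v - r
      | none => result  -- unreachable: i > 0 means run_min was already set
    else result
  let runMin' := match runMin with | none => some v | some r => if v < r then some v else some r
  (result', runMin', curMax')

def largest_loss_alt (pricesList : List Int) : Int :=
  ((PySem.List.enumerate pricesList 0).foldl llStep (0, none, none)).1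

-- ===== PRECONDITION & SPEC =====
def Spec_largest_loss (pricesList : List Int) (out : Int) : Prop := out = largest_loss_alt pricesList
instance (pricesList : List Int) (out : Int) : Decidable (Spec_largest_loss pricesList out) := by unfold Spec_largest_loss; infer_instance

-- ===== CLAIM (what is proved, stated in full; the proofs are below) =====
def Claim_equal_largest_loss : Prop := ∀ (pricesList : List Int), Dom_largest_loss pricesList → Spec_largest_loss pricesList (largest_loss pricesList)

-- ===== LEMMAS AND PROOFS =====

-- optional-state folds describing the run_min / cur_max components of B's loop
def ominF (o : Option Int) (u : List Int) : Option Int :=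
  u.foldl (fun o v => match o with | none => some v | some r => if v < r then some v else some r) o
def omaxF (o : Option Int) (u : List Int) : Option Int :=
  u.foldl (fun o v => match o with | none => some v | some m => if m ≤ v then some v else some m) o

theorem ominF_some (a : Int) (u : List Int) : ominF (some a) u = some (u.foldl min a) := by
  induction u generalizing a with
  | nil => rfl
  | cons x t ih =>
      simp only [ominF, List.foldl] at *
      rw [show (if x < a then some x else some a) = some (min a x) by
        by_cases h : x < a
        · simp [h, le_of_lt h]
        · rw [if_neg h]; rw [not_lt] at h; simp [h]]
      exact ih (min a x)

theorem omaxF_some (a : Int) (u : List Int) : omaxF (some a) u = some (u.foldl max a) := by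
  induction u generalizing a with
  | nil => rfl
  | cons x t ih =>
      simp only [omaxF, List.foldl] at *
      rw [show (if a ≤ x then some x else some a) = some (max a x) by
        by_cases h : a ≤ x
        · simp [h]
        · rw [if_neg h]; rw [not_le] at h; simp [max_def, not_le.mpr h]]
      exact ih (max a x)

theorem ominF_cons (c : Int) (t : List Int) : ominF none (c :: t) = some (t.foldl min c) := by
  simpa [ominF, List.foldl] using ominF_some c t

theorem omaxF_cons (c : Int) (t : List Int) : omaxF none (c :: t) = some (t.foldl max c) := by
  simpa [omaxF, List.foldl] using omaxF_some c t

-- the second and third state components of B's fold are exactly the optional min/max folds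
theorem llStep_comps (u : List Int) : ∀ (s : Int) (st : Int × Option Int × Option Int),
    ((PySem.List.enumerate u s).foldl llStep st).2 = (ominF st.2.1 u, omaxF st.2.2 u) := by
  induction u with
  | nil => intro s st; simp [PySem.List.enumerate_nil, ominF, omaxF]
  | cons x t ih =>
      intro s st
      rw [PySem.List.enumerate_cons, List.foldl_cons, ih (s + 1) (llStep st (s, x))]
      have hmin : (llStep st (s, x)).2.1
          = (match st.2.1 with | none => some x | some r => if x < r then some x else some r) := rfl
      have hmax : (llStep st (s, x)).2.2
          = (match st.2.2 with | none => some x | some M => if M ≤ x then some x else some M) := by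
        cases hcm : st.2.2 with
        | none => simp [llStep, hcm]
        | some M => by_cases h : M ≤ x <;> simp [llStep, hcm, h]
      rw [hmin, hmax]
      rfl

-- once cur_max is a strict upper bound of the remaining elements, result never changes
theorem llStep_tail (w : List Int) : ∀ (s : Int) (r : Int) (rm : Option Int) (M : Int),
    (∀ y ∈ w, y < M) →
    ((PySem.List.enumerate w s).foldl llStep (r, rm, some M)).1 = r := by
  induction w with
  | nil => intro s r rm M _; simp [PySem.List.enumerate_nil]
  | cons x t ih =>
      intro s r rm M hb
      rw [PySem.List.enumerate_cons, List.foldl_cons]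
      have hx : ¬ (M ≤ x) := not_le.mpr (hb x (List.mem_cons_self ..))
      have hstep : llStep (r, rm, some M) (s, x)
          = (r, (match rm with | none => some x | some q => if x < q then some x else some q), some M) := by
        cases rm <;> simp [llStep, hx]
      rw [hstep]
      exact ih (s + 1) r _ M (fun y hy => hb y (List.mem_cons_of_mem _ hy))

-- a ≤-bound on the elements bounds the foldl max
theorem foldl_max_le (t : List Int) : ∀ (c m : Int), c ≤ m → (∀ y ∈ t, y ≤ m) → t.foldl max c ≤ m := by
  induction t with
  | nil => intro c m hc _; simpa using hc
  | cons x t ih =>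
      intro c m hc hb
      simp only [List.foldl]
      exact ih (max c x) m (max_le hc (hb x (List.mem_cons_self ..)))
        (fun y hy => hb y (List.mem_cons_of_mem _ hy))

-- B's value on the decomposition u ++ m :: w with u ≤ m and w < m
theorem alt_decomp (u : List Int) (m : Int) (w : List Int)
    (hu : ∀ y ∈ u, y ≤ m) (hw : ∀ y ∈ w, y < m) :
    largest_loss_alt (u ++ m :: w)
      = match u with | [] => 0 | c :: t => m - t.foldl min c := by
  unfold largest_loss_alt
  rw [PySem.List.enumerate_append, PySem.List.enumerate_cons, List.foldl_append, List.foldl_cons]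
  cases u with
  | nil =>
      simp only [PySem.List.enumerate_nil, List.foldl_nil]
      have hstep : llStep (0, none, none) ((0 : Int) + ((List.length ([] : List Int) : Nat) : Int), m)
          = (0, some m, some m) := by simp [llStep]
      rw [hstep]
      exact llStep_tail w _ 0 (some m) m hw
  | cons c t =>
      have hcomp := llStep_comps (c :: t) 0 (0, (none : Option Int), (none : Option Int))
      rw [ominF_cons, omaxF_cons] at hcomp
      have htrig : t.foldl max c ≤ m :=
        foldl_max_le t c m (hu c (List.mem_cons_self ..))
          (fun y hy => hu y (List.mem_cons_of_mem _ hy))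
      have hpos : (0 : Int) < 0 + (((c :: t).length : Nat) : Int) := by
        rw [zero_add]; exact_mod_cast Nat.succ_pos t.length
      generalize hF : (PySem.List.enumerate (c :: t) 0).foldl llStep
          ((0 : Int), (none : Option Int), (none : Option Int)) = F at hcomp ⊢
      obtain ⟨r0, rm, cm⟩ := F
      rw [Prod.mk.injEq] at hcomp
      obtain ⟨hrm, hcm⟩ := hcomp
      subst hrm
      subst hcm
      have hstep : llStep (r0, some (t.foldl min c), some (t.foldl max c))
            ((0 : Int) + (((c :: t).length : Nat) : Int), m)
          = (m - t.foldl min c,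
             (if m < t.foldl min c then some m else some (t.foldl min c)), some m) := by
        simp [llStep, htrig]
      rw [hstep]
      exact llStep_tail w _ _ _ m hw

-- every list with an upper-bound element m splits as u ++ m :: w with all of w strictly below m
theorem last_max_decomp (l : List Int) (m : Int) (hm : m ∈ l) (hb : ∀ y ∈ l, y ≤ m) :
    ∃ u w, l = u ++ m :: w ∧ (∀ y ∈ w, y < m) := by
  induction l using List.reverseRecOn with
  | nil => cases hm
  | append_singleton l' x ih =>
      by_cases hx : x = m
      · exact ⟨l', [], by simp [hx], by simp⟩
      · have hm' : m ∈ l' := by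
          rcases List.mem_append.mp hm with h | h
          · exact h
          · have hxm : m = x := by simpa using h
            exact absurd hxm.symm hx
        obtain ⟨u, w, hsplit, hw⟩ := ih hm' (fun y hy => hb y (List.mem_append_left _ hy))
        refine ⟨u, w ++ [x], by simp [hsplit], ?_⟩
        intro z hz
        rcases List.mem_append.mp hz with h | h
        · exact hw z h
        · have hzx : z = x := by simpa using h
          rw [hzx]
          exact lt_of_le_of_ne (hb x (List.mem_append_right _ (by simp))) hx

-- A's inner max? computes exactly the index u.length on the decomposition
theorem lastIdx_eq (u : List Int) (m : Int) (w : List Int) (hw : ∀ y ∈ w, y < m) :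
    PySem.List.max?
      (((PySem.List.enumerate (u ++ m :: w) 0).filter (fun p => p.2 == m)).map (·.1))
      (fun y => y) = some ((u.length : Nat) : Int) := by
  have hlen : u.length < (u ++ m :: w).length := by simp
  have hget : (u ++ m :: w)[u.length]'hlen = m := by
    rw [List.getElem_append_right (le_refl u.length)]
    simp
  have hmemL : ((u.length : Nat) : Int)
      ∈ ((PySem.List.enumerate (u ++ m :: w) 0).filter (fun p => p.2 == m)).map (·.1) := by
    have hpair : ((((u.length : Nat) : Int), m) : Int × Int)
        ∈ (PySem.List.enumerate (u ++ m :: w) 0).filter (fun p => p.2 == m) := by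
      apply List.mem_filter.mpr
      constructor
      · rw [PySem.List.mem_enumerate_iff]
        refine ⟨u.length, hlen, ?_⟩
        rw [Prod.mk.injEq]
        exact ⟨by simp, hget.symm⟩
      · simp
    exact List.mem_map.mpr ⟨_, hpair, rfl⟩
  have hbound : ∀ y ∈ ((PySem.List.enumerate (u ++ m :: w) 0).filter (fun p => p.2 == m)).map (·.1),
      y ≤ ((u.length : Nat) : Int) := by
    intro y hy
    obtain ⟨p, hp, hpy⟩ := List.mem_map.mp hy
    obtain ⟨hpe, hpv⟩ := List.mem_filter.mp hp
    obtain ⟨k, hk, hpk⟩ := (PySem.List.mem_enumerate_iff _ 0 p).mp hpe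
    subst hpk
    simp only at hpv hpy
    have hkv : (u ++ m :: w)[k]'hk = m := by simpa using hpv
    rw [← hpy]
    by_contra hgt
    rw [not_le] at hgt
    have hklt : u.length < k := by
      have : ((u.length : Nat) : Int) < ((k : Nat) : Int) := by simpa using hgt
      exact_mod_cast this
    rw [List.getElem_append_right (le_of_lt hklt)] at hkv
    rw [List.getElem_cons] at hkv
    rw [dif_neg (by omega : ¬ (k - u.length = 0))] at hkv
    have hmw : m ∈ w := hkv ▸ List.getElem_mem _
    exact absurd (hw m hmw) (lt_irrefl m)
  cases hmx : PySem.List.max?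
      (((PySem.List.enumerate (u ++ m :: w) 0).filter (fun p => p.2 == m)).map (·.1))
      (fun y => y) with
  | none =>
      rw [PySem.List.max?_eq_none_iff] at hmx
      rw [hmx] at hmemL; cases hmemL
  | some j =>
      have hj1 : j ≤ ((u.length : Nat) : Int) := hbound j (PySem.List.max?_mem hmx)
      have hj2 : ((u.length : Nat) : Int) ≤ j := PySem.List.max?_isMax hmx _ hmemL
      rw [le_antisymm hj1 hj2]

-- ===== VERDICT (by name: the statement is the Claim_ definition above) =====
theorem largest_loss_spec : Claim_equal_largest_loss := by
  intro l _
  unfold Spec_largest_loss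
  by_cases hlen : l.length ≤ 1
  · -- short lists: both return 0
    cases l with
    | nil => simp [largest_loss, largest_loss_alt, PySem.List.enumerate_nil]
    | cons a l2 =>
      cases l2 with
      | nil =>
          simp [largest_loss, largest_loss_alt, PySem.List.enumerate_cons,
                PySem.List.enumerate_nil, llStep]
      | cons b l3 => simp at hlen
  · -- long lists: split at the last occurrence of the maximum
    have hne : l ≠ [] := by intro h; subst h; simp at hlen
    cases hmx : PySem.List.max? l (fun y => y) with
    | none => exact absurd ((PySem.List.max?_eq_none_iff l _).mp hmx) hne
    | some m =>
        have hbnd : ∀ y ∈ l, y ≤ m := PySem.List.max?_isMax hmx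
        obtain ⟨u, w, hsplit, hw⟩ := last_max_decomp l m (PySem.List.max?_mem hmx) hbnd
        subst hsplit
        have hu : ∀ y ∈ u, y ≤ m := fun y hy => hbnd y (List.mem_append_left _ hy)
        rw [alt_decomp u m w hu hw]
        simp only [largest_loss, if_neg hlen, hmx, lastIdx_eq u m w hw]
        cases u with
        | nil => simp
        | cons c t =>
            rw [if_neg (by simp; omega)]
            rw [PySem.List.slice_to_natCast, List.take_left, PySem.List.min?_id_cons]
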